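-- pv_equiv track=rewrite | github.com/jim-donovan/DI-agent-2 | ui.py | _extract_agreement
-- ===== SOURCE A (Python) =====
-- def _extract_agreement(content: str) -> str:
--     """Extract agreement level from comparison report."""
--     lines = content.split('\n')
--     for line in lines:
--         if "Agreement Level:" in line:
--             try:
--                 agreement = line.split("Agreement Level:")[1].strip()
--                 return agreement
--             except (IndexError, AttributeError):
--                 pass
--     return "Unknown"
-- ===== SOURCE B (Python) =====
-- def _extract_agreement(content: str) -> str:
--     """Extract agreement level from comparison report."""
--     marker = "Agreement Level:"
--     idx = content.find(marker)
--     if idx == -1: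
--         return "Unknown"
--     start = idx + len(marker)
--     end = content.find('\n', start)
--     if end == -1:
--         end = len(content)
--     return content[start:end].strip()
-- ===== Notes on version B (the rewrite author's own statement) =====
-- stated objective: simpler
-- what changed: Replaces A's split-into-lines list and per-line membership/split loop by direct index arithmetic on the raw string: one find for the marker, one find for the next newline, slice and strip.
-- intended difference: On inputs whose first 'Agreement Level:' line contains the marker a second time, A returns only the text between the two marker occurrences (an artefact of line.split(marker)[1]), while B returns the whole rest of the line after the first marker, which is the intended agreement text. — e.g. on _extract_agreement("Agreement Level: Agreement Level:"): A returns "", B returns "Agreement Level:"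
import Mathlib
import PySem

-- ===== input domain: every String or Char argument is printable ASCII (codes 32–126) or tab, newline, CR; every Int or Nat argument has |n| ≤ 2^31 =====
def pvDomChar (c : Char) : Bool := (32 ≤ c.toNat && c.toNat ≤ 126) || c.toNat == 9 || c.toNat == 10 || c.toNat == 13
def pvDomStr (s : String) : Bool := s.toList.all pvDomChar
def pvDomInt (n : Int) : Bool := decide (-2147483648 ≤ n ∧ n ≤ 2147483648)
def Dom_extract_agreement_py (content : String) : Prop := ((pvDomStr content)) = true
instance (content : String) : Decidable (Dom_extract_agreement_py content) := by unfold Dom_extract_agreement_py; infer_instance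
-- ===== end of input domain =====

-- B replaces A's split-into-lines list and per-line loop by direct index arithmetic on the raw
-- string (find the marker, take up to the next newline, strip); objective: simpler. Outside D_
-- (no repeated marker on the agreement line) the two agree; inside D_ they differ as stated.

-- ===== PORT A =====
def pvMarkA : List Char := "Agreement Level:".toList

-- the 'for line in lines' loop; 'except (IndexError, AttributeError): pass' is the 'none' case
-- of pyGet? (IndexError on [1]; AttributeError is unreachable since line is a str)
def pvALoop : List (List Char) → String
  | [] => "Unknown"
  | line :: rest =>
    if PySem.Chars.isIn pvMarkA line then
      match PySem.List.pyGet? (PySem.Chars.splitOn line pvMarkA) 1 with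
      | some part => String.ofList (PySem.Chars.strip part)
      | none => pvALoop rest
    else pvALoop rest

def extract_agreement_py (content : String) : String :=
  pvALoop (PySem.Chars.splitOn content.toList ['\n'])

-- ===== PORT B =====
def pvMarkB : List Char := "Agreement Level:".toList

def extract_agreement_py_alt (content : String) : String :=
  let cs := content.toList
  let idx := PySem.Chars.find cs pvMarkB
  if idx = -1 then "Unknown"
  else
    let start : Int := idx + (pvMarkB.length : Int)
    let e := PySem.Chars.findFrom cs ['\n'] start none
    let e2 := if e = -1 then (cs.length : Int) else e
    String.ofList (PySem.Chars.strip (PySem.List.slice cs (some start) (some e2)))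

-- ===== PRECONDITION & SPEC =====
def pvMarkD : List Char := "Agreement Level:".toList

-- On inputs whose first "Agreement Level:" line contains the marker a second time, A returns only
-- the text between the two marker occurrences (an artefact of line.split(marker)[1]), while B
-- returns the whole rest of the line after the first marker, which is the intended agreement text.
def D_extract_agreement_py (content : String) : Prop :=
  PySem.Chars.find content.toList pvMarkD ≠ -1 ∧
  PySem.Chars.isIn pvMarkD
    ((content.toList.drop ((PySem.Chars.find content.toList pvMarkD).toNat + 16)).takeWhile
      (fun c => c != '\n')) = true
instance (content : String) : Decidable (D_extract_agreement_py content) := by unfold D_extract_agreement_py; infer_instance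

def Spec_extract_agreement_py (content : String) (out : String) : Prop := ¬ D_extract_agreement_py content → out = extract_agreement_py_alt content
instance (content : String) (out : String) : Decidable (Spec_extract_agreement_py content out) := by unfold Spec_extract_agreement_py; infer_instance

def pvDiffWitness_extract_agreement_py : String := "Agreement Level: Agreement Level:"
def pvDiffWitnessOut_extract_agreement_py : String × String := ("", "Agreement Level:")

-- ===== CLAIM (what is proved, stated in full; the proofs are below) =====
def Claim_unchanged_extract_agreement_py : Prop := ∀ (content : String), Dom_extract_agreement_py content → Spec_extract_agreement_py content (extract_agreement_py content)
def Claim_changed_extract_agreement_py : Prop := Dom_extract_agreement_py (pvDiffWitness_extract_agreement_py) ∧ D_extract_agreement_py (pvDiffWitness_extract_agreement_py) ∧ extract_agreement_py (pvDiffWitness_extract_agreement_py) = pvDiffWitnessOut_extract_agreement_py.1 ∧ extract_agreement_py_alt (pvDiffWitness_extract_agreement_py) = pvDiffWitnessOut_extract_agreement_py.2 ∧ pvDiffWitnessOut_extract_agreement_py.1 ≠ pvDiffWitnessOut_extract_agreement_py.2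
def Claim_exact_extract_agreement_py : Prop := ∀ (content : String), Dom_extract_agreement_py content → D_extract_agreement_py content → extract_agreement_py content ≠ extract_agreement_py_alt content

-- ===== LEMMAS AND PROOFS =====

lemma pvMark_nl : '\n' ∉ pvMarkA := by decide
lemma pvMark_len : pvMarkA.length = 16 := by decide
lemma pvMarkB_eq : pvMarkB = pvMarkA := rfl
lemma pvMarkD_eq : pvMarkD = pvMarkA := rfl

-- a prefix of a suffix is an infix
lemma pv_prefix_drop_infix {sub s : List Char} {j : Nat} (h : sub <+: s.drop j) : sub <:+: s := by
  obtain ⟨w, hw⟩ := h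
  exact ⟨s.take j, w, by rw [List.append_assoc, hw, List.take_append_drop]⟩

-- an occurrence of a newline-free pattern at a position inside l cannot straddle the '\n'
lemma pv_occ_in_left {sub l rest : List Char} (hs : '\n' ∉ sub) {j : Nat} (hj : j ≤ l.length)
    (h : sub <+: (l ++ '\n' :: rest).drop j) : sub <+: l.drop j ∧ j + sub.length ≤ l.length := by
  rw [List.drop_append_of_le_length hj] at h
  obtain ⟨w, hw⟩ := h
  have hdl : (List.drop j l).length = l.length - j := by simp
  by_cases hle : sub.length ≤ (l.drop j).length
  · constructor
    · have h2 := congrArg (List.take sub.length) hw.symm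
      rw [List.take_append_of_le_length hle, List.take_left] at h2
      exact h2 ▸ List.take_prefix _ _
    · omega
  · exfalso
    apply hs
    have hlt : (l.drop j).length < sub.length := by omega
    have h1 : (l.drop j ++ '\n' :: rest)[(l.drop j).length]? = some '\n' := by
      rw [List.getElem?_append_right (le_refl _)]
      simp
    rw [← hw, List.getElem?_append_left hlt] at h1
    exact List.mem_of_getElem? h1

-- characterisation of Chars.find: first occurrence
lemma pv_find_eq {s sub : List Char} {n : Nat} (h1 : sub <+: s.drop n)
    (h2 : ∀ i < n, ¬ sub <+: s.drop i) : PySem.Chars.find s sub = (n : Int) := by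
  have h0 : 0 ≤ PySem.Chars.find s sub :=
    (PySem.Chars.find_nonneg_iff _ _).mpr (pv_prefix_drop_infix h1)
  obtain ⟨ha, hb⟩ := PySem.Chars.find_spec h0
  rcases lt_trichotomy (PySem.Chars.find s sub).toNat n with hlt | heq | hgt
  · exact absurd ha (h2 _ hlt)
  · omega
  · exact absurd h1 (hb n hgt)

lemma pv_find_neg {s sub : List Char} (h : ∀ i, ¬ sub <+: s.drop i) :
    PySem.Chars.find s sub = -1 := by
  apply (PySem.Chars.find_eq_neg_one_iff _ _).mpr
  intro hin
  obtain ⟨x, y, hxy⟩ := hin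
  exact h x.length ⟨y, by rw [← hxy, List.append_assoc, List.drop_left]⟩

lemma pv_find_neg_all {s sub : List Char} (h : PySem.Chars.find s sub = -1) :
    ∀ i, ¬ sub <+: s.drop i := by
  intro i hi
  have := (PySem.Chars.find_nonneg_iff s sub).mpr (pv_prefix_drop_infix hi)
  omega

-- drop through the first line
lemma pv_drop_shift (l rest : List Char) (k : Nat) :
    (l ++ '\n' :: rest).drop (l.length + 1 + k) = rest.drop k := by
  rw [show l.length + 1 + k = l.length + (1 + k) by omega, List.drop_length_add_append,
    show 1 + k = k + 1 by omega, List.drop_succ_cons]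

lemma pv_cast_add (a b : Nat) : ((a : Int) + (b : Int)) = ((a + b : Nat) : Int) := by push_cast; ring

-- ===== splitOn.go structure =====

lemma pv_go_zero (sep l cur : List Char) (acc : List (List Char)) :
    PySem.Chars.splitOn.go sep 0 l cur acc = ((cur.reverse ++ l) :: acc).reverse := by
  simp [PySem.Chars.splitOn.go]

lemma pv_go_nil (sep cur : List Char) (f : Nat) (acc : List (List Char)) :
    PySem.Chars.splitOn.go sep (f+1) [] cur acc = (cur.reverse :: acc).reverse := by
  simp [PySem.Chars.splitOn.go]

lemma pv_go_cons (sep cur : List Char) (f : Nat) (c : Char) (rest : List Char) (acc : List (List Char)) :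
    PySem.Chars.splitOn.go sep (f+1) (c :: rest) cur acc =
      if sep.isPrefixOf (c :: rest) then
        PySem.Chars.splitOn.go sep f (List.drop sep.length (c :: rest)) [] (cur.reverse :: acc)
      else PySem.Chars.splitOn.go sep f rest (c :: cur) acc := by
  rw [PySem.Chars.splitOn.go]

lemma pv_go_acc (sep : List Char) : ∀ (f : Nat) (s cur : List Char) (acc : List (List Char)),
    PySem.Chars.splitOn.go sep f s cur acc = acc.reverse ++ PySem.Chars.splitOn.go sep f s cur [] := by
  intro f
  induction f with
  | zero => intro s cur acc; rw [pv_go_zero, pv_go_zero]; simp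
  | succ f ih =>
    intro s cur acc
    cases s with
    | nil => rw [pv_go_nil, pv_go_nil]; simp
    | cons c rest =>
      rw [pv_go_cons, pv_go_cons]
      split
      · rw [ih _ [] (cur.reverse :: acc), ih _ [] [cur.reverse]]; simp
      · exact ih _ _ acc

lemma pv_go_noocc (sep : List Char) : ∀ (s : List Char), (∀ i, ¬ sep <+: s.drop i) →
    ∀ (f : Nat) (cur : List Char) (acc : List (List Char)), s.length < f →
    PySem.Chars.splitOn.go sep f s cur acc = acc.reverse ++ [cur.reverse ++ s] := by
  intro s
  induction s with
  | nil =>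
    intro _ f cur acc hf
    cases f with
    | zero => omega
    | succ f => rw [pv_go_nil]; simp
  | cons c rest ih =>
    intro h f cur acc hf
    cases f with
    | zero => simp at hf
    | succ f =>
      rw [pv_go_cons]
      rw [if_neg (by
        intro hp
        exact h 0 (by simpa using List.isPrefixOf_iff_prefix.mp hp))]
      rw [ih (fun i => by simpa using h (i+1)) f (c :: cur) acc (by simp at hf ⊢; omega)]
      simp

lemma pv_go_occ (sep : List Char) (hsep : sep ≠ []) : ∀ (u : List Char) (v : List Char),
    (∀ i < u.length, ¬ sep <+: (u ++ sep ++ v).drop i) →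
    ∀ (f : Nat) (cur : List Char) (acc : List (List Char)), (u ++ sep ++ v).length < f →
    PySem.Chars.splitOn.go sep f (u ++ sep ++ v) cur acc =
      acc.reverse ++ [cur.reverse ++ u] ++ PySem.Chars.splitOn.go sep (f - u.length - 1) v [] [] := by
  intro u
  induction u with
  | nil =>
    intro v _ f cur acc hf
    cases f with
    | zero => simp at hf
    | succ f =>
      obtain ⟨c, sep', rfl⟩ : ∃ c sep', sep = c :: sep' := by
        cases sep with
        | nil => exact absurd rfl hsep
        | cons c s => exact ⟨c, s, rfl⟩
      simp only [List.nil_append, List.cons_append]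
      rw [pv_go_cons]
      rw [if_pos (List.isPrefixOf_iff_prefix.mpr (by
        rw [← List.cons_append]; exact List.prefix_append _ _))]
      rw [show List.drop (c :: sep').length (c :: (sep' ++ v)) = v by
        rw [← List.cons_append, List.drop_left]]
      rw [pv_go_acc]
      simp
  | cons a u' ih =>
    intro v h f cur acc hf
    cases f with
    | zero => simp at hf
    | succ f =>
      simp only [List.cons_append]
      rw [pv_go_cons]
      rw [if_neg (by
        intro hp
        exact h 0 (by simp) (by simpa using List.isPrefixOf_iff_prefix.mp hp))]
      have hrec := ih v (fun i hi => by
          have h2 := h (i+1) (by simp; omega)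
          simpa using h2) f (a :: cur) acc (by
            simp only [List.cons_append, List.length_cons] at hf; omega)
      rw [hrec]
      have harith : (f + 1) - (a :: u').length - 1 = f - u'.length - 1 := by
        simp only [List.length_cons]; omega
      rw [harith]
      simp

-- ===== the line structure of splitOn cs ['\n'] =====

def pvLines : List Char → List (List Char)
  | [] => [[]]
  | c :: t => if c = '\n' then [] :: pvLines t else (pvLines t).modifyHead (c :: ·)

lemma pvLines_ne_nil (cs : List Char) : pvLines cs ≠ [] := by
  induction cs with
  | nil => simp [pvLines]
  | cons c t ih =>
    simp only [pvLines]
    split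
    · simp
    · cases h : pvLines t with
      | nil => exact absurd h ih
      | cons a t' => simp [List.modifyHead]

lemma pv_go_nlines : ∀ (f : Nat) (s cur : List Char) (acc : List (List Char)), s.length < f →
    PySem.Chars.splitOn.go ['\n'] f s cur acc =
      acc.reverse ++ (pvLines s).modifyHead (cur.reverse ++ ·) := by
  intro f
  induction f with
  | zero => intro s cur acc h; omega
  | succ f ih =>
    intro s cur acc h
    cases s with
    | nil => rw [pv_go_nil]; simp [pvLines]
    | cons c rest =>
      rw [pv_go_cons]
      by_cases hc : c = '\n'
      · rw [if_pos (by simp [List.isPrefixOf, hc])]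
        subst hc
        rw [show List.drop (['\n'].length) ('\n' :: rest) = rest by simp]
        rw [ih rest [] (cur.reverse :: acc) (by simp at h ⊢; omega)]
        simp only [pvLines, if_pos rfl]
        cases hr : pvLines rest with
        | nil => exact absurd hr (pvLines_ne_nil rest)
        | cons a t' => simp [List.modifyHead]
      · rw [if_neg (by simp [List.isPrefixOf]; intro he; exact absurd he.symm hc)]
        rw [ih rest (c :: cur) acc (by simp at h ⊢; omega)]
        simp only [pvLines, if_neg hc]
        cases hr : pvLines rest with
        | nil => exact absurd hr (pvLines_ne_nil rest)
        | cons a t' => simp [List.modifyHead]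

lemma pv_splitOn_nl (cs : List Char) : PySem.Chars.splitOn cs ['\n'] = pvLines cs := by
  unfold PySem.Chars.splitOn
  rw [pv_go_nlines (cs.length + 1) cs [] [] (by omega)]
  cases hr : pvLines cs with
  | nil => exact absurd hr (pvLines_ne_nil cs)
  | cons a t' => simp [List.modifyHead]

lemma pvLines_no_nl {l : List Char} (h : '\n' ∉ l) : pvLines l = [l] := by
  induction l with
  | nil => rfl
  | cons c t ih =>
    simp only [pvLines]
    rw [if_neg (by intro hc; exact h (hc ▸ List.mem_cons_self ..))]
    rw [ih (fun hm => h (List.mem_cons_of_mem _ hm))]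
    simp [List.modifyHead]

lemma pvLines_split {l : List Char} (rest : List Char) (h : '\n' ∉ l) :
    pvLines (l ++ '\n' :: rest) = l :: pvLines rest := by
  induction l with
  | nil => simp [pvLines]
  | cons c t ih =>
    simp only [List.cons_append, pvLines]
    rw [if_neg (by intro hc; exact h (hc ▸ List.mem_cons_self ..))]
    rw [ih (fun hm => h (List.mem_cons_of_mem _ hm))]
    simp [List.modifyHead]

-- ===== A's per-line value =====

-- the value A extracts from the first line containing the marker
def pvAfter (line : List Char) : List Char :=
  if PySem.Chars.find (line.drop ((PySem.Chars.find line pvMarkA).toNat + 16)) pvMarkA = -1 then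
    line.drop ((PySem.Chars.find line pvMarkA).toNat + 16)
  else
    (line.drop ((PySem.Chars.find line pvMarkA).toNat + 16)).take
      (PySem.Chars.find (line.drop ((PySem.Chars.find line pvMarkA).toNat + 16)) pvMarkA).toNat

lemma pv_splitOn_get1 {line : List Char} (h : pvMarkA <:+: line) :
    PySem.List.pyGet? (PySem.Chars.splitOn line pvMarkA) 1 = some (pvAfter line) := by
  have h0 : 0 ≤ PySem.Chars.find line pvMarkA := (PySem.Chars.find_nonneg_iff _ _).mpr h
  obtain ⟨ha, hb⟩ := PySem.Chars.find_spec h0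
  set p := (PySem.Chars.find line pvMarkA).toNat with hp
  obtain ⟨w, hw⟩ := ha
  have hplen : p + 16 ≤ line.length := by
    have hlw := congrArg List.length hw
    simp [pvMark_len] at hlw
    omega
  have hwv : line.drop (p + 16) = w := by
    have hd := congrArg (List.drop 16) hw
    rw [List.drop_drop] at hd
    simp [pvMark_len] at hd
    first
      | (rw [show p + 16 = 16 + p by omega]; exact hd.symm)
      | (rw [show p + 16 = 16 + p by omega]; exact hd)
      | exact hd.symm
      | exact hd
  have hdec : line = line.take p ++ pvMarkA ++ w := by
    conv_lhs => rw [← List.take_append_drop p line, ← hw]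
    rw [List.append_assoc]
  have hulen : (line.take p).length = p := by simp; omega
  unfold PySem.Chars.splitOn
  have hocc := pv_go_occ pvMarkA (by decide) (line.take p) w
    (by intro i hi; rw [← hdec]; exact hb i (by omega))
    (line.length + 1) [] [] (by rw [← hdec]; omega)
  rw [show PySem.Chars.splitOn.go pvMarkA (line.length + 1) line [] [] =
      PySem.Chars.splitOn.go pvMarkA (line.length + 1) (line.take p ++ pvMarkA ++ w) [] [] by rw [← hdec]]
  rw [hocc]
  have hlens : line.length = p + 16 + w.length := by
    have hld := congrArg List.length hdec
    simp [pvMark_len] at hld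
    omega
  have hf' : w.length < line.length + 1 - (line.take p).length - 1 := by
    rw [hulen]; omega
  unfold pvAfter
  rw [← hp, hwv]
  by_cases hq : PySem.Chars.find w pvMarkA = -1
  · rw [pv_go_noocc pvMarkA w (pv_find_neg_all hq) _ [] [] hf']
    simp [hq, PySem.List.pyGet?, PySem.List.pyIdx?]
  · have hq0 : 0 ≤ PySem.Chars.find w pvMarkA := by
      have := PySem.Chars.neg_one_le_find w pvMarkA
      omega
    obtain ⟨ha2, hb2⟩ := PySem.Chars.find_spec hq0
    obtain ⟨z, hz⟩ := ha2
    have hq16 : (PySem.Chars.find w pvMarkA).toNat + 16 ≤ w.length := by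
      have hlz := congrArg List.length hz
      simp only [List.length_append, List.length_drop, pvMark_len] at hlz
      omega
    have hdec2 : w = w.take (PySem.Chars.find w pvMarkA).toNat ++ pvMarkA ++ z := by
      conv_lhs => rw [← List.take_append_drop (PySem.Chars.find w pvMarkA).toNat w, ← hz]
      rw [List.append_assoc]
    have hocc2 := pv_go_occ pvMarkA (by decide) (w.take (PySem.Chars.find w pvMarkA).toNat) z
      (by intro i hi; rw [← hdec2]; exact hb2 i (by simp at hi; omega))
      (line.length + 1 - (line.take p).length - 1) [] [] (by rw [← hdec2]; omega)
    rw [show PySem.Chars.splitOn.go pvMarkA (line.length + 1 - (line.take p).length - 1) w [] [] =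
        PySem.Chars.splitOn.go pvMarkA (line.length + 1 - (line.take p).length - 1)
          (w.take (PySem.Chars.find w pvMarkA).toNat ++ pvMarkA ++ z) [] [] by rw [← hdec2]]
    rw [hocc2]
    simp [hq, PySem.List.pyGet?, PySem.List.pyIdx?]

lemma pvALoop_cons_mark {line : List Char} (rest : List (List Char)) (h : pvMarkA <:+: line) :
    pvALoop (line :: rest) = String.ofList (PySem.Chars.strip (pvAfter line)) := by
  have htrue : PySem.Chars.isIn pvMarkA line = true := (PySem.Chars.isIn_iff_infix _ _).mpr h
  simp [pvALoop, htrue, pv_splitOn_get1 h]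

lemma pvALoop_cons_nomark {line : List Char} (rest : List (List Char)) (h : ¬ pvMarkA <:+: line) :
    pvALoop (line :: rest) = pvALoop rest := by
  have hfalse : PySem.Chars.isIn pvMarkA line = false := (PySem.Chars.isIn_eq_false_iff _ _).mpr h
  simp [pvALoop, hfalse]

lemma pvAfter_nosecond {line : List Char}
    (hv : PySem.Chars.find (line.drop ((PySem.Chars.find line pvMarkA).toNat + 16)) pvMarkA = -1) :
    pvAfter line = line.drop ((PySem.Chars.find line pvMarkA).toNat + 16) := by
  unfold pvAfter
  rw [if_pos hv]

-- ===== B-side evaluation =====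

lemma pv_toList_mk (cs : List Char) : (String.ofList cs).toList = cs := by simp

lemma pvB_unknown {cs : List Char} (h : PySem.Chars.find cs pvMarkA = -1) :
    extract_agreement_py_alt (String.ofList cs) = "Unknown" := by
  simp only [extract_agreement_py_alt, pv_toList_mk, pvMarkB_eq]
  rw [if_pos h]

lemma pvB_eval_nonl {cs : List Char} {i : Nat} (hf : PySem.Chars.find cs pvMarkA = (i : Int))
    (hlen : i + 16 ≤ cs.length)
    (hnl : PySem.Chars.find (cs.drop (i + 16)) ['\n'] = -1) :
    extract_agreement_py_alt (String.ofList cs) = String.ofList (PySem.Chars.strip (cs.drop (i + 16))) := by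
  simp only [extract_agreement_py_alt, pv_toList_mk, pvMarkB_eq]
  rw [hf, if_neg (show ¬((i : Int) = -1) by omega), pvMark_len, pv_cast_add]
  rw [PySem.Chars.findFrom_natCast cs ['\n'] (i + 16) (by omega)]
  rw [hnl, if_pos rfl, if_pos rfl]
  rw [PySem.List.slice_toNat cs (Int.natCast_nonneg _) (Int.natCast_nonneg _)]
  simp only [Int.toNat_natCast]
  refine congrArg (fun x => String.ofList (PySem.Chars.strip x)) ?_
  rw [show cs.length - (i + 16) = (cs.drop (i + 16)).length by simp]
  exact List.take_length

lemma pvB_eval_nl {cs : List Char} {i e : Nat} (hf : PySem.Chars.find cs pvMarkA = (i : Int))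
    (hlen : i + 16 ≤ cs.length)
    (hnl : PySem.Chars.find (cs.drop (i + 16)) ['\n'] = (e : Int)) :
    extract_agreement_py_alt (String.ofList cs) = String.ofList (PySem.Chars.strip ((cs.drop (i + 16)).take e)) := by
  simp only [extract_agreement_py_alt, pv_toList_mk, pvMarkB_eq]
  rw [hf, if_neg (show ¬((i : Int) = -1) by omega), pvMark_len, pv_cast_add]
  rw [PySem.Chars.findFrom_natCast cs ['\n'] (i + 16) (by omega)]
  rw [hnl, if_neg (show ¬((e : Int) = -1) by omega)]
  rw [if_neg (show ¬(((i + 16 : Nat) : Int) + (e : Int) = -1) by omega)]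
  rw [show ((i + 16 : Nat) : Int) + (e : Int) = ((i + 16 + e : Nat) : Int) by push_cast; ring]
  rw [PySem.List.slice_toNat cs (Int.natCast_nonneg _) (Int.natCast_nonneg _)]
  simp only [Int.toNat_natCast]
  refine congrArg (fun x => String.ofList (PySem.Chars.strip x)) ?_
  rw [show i + 16 + e - (i + 16) = e by omega]

-- ===== ¬D_ consequences =====

lemma pv_takeWhile_no_nl {x : List Char} (hx : '\n' ∉ x) :
    x.takeWhile (fun c => c != '\n') = x := by
  induction x with
  | nil => rfl
  | cons c t ih =>
    have hc : (c != '\n') = true := by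
      rw [bne_iff_ne]
      intro h
      exact hx (h ▸ List.mem_cons_self ..)
    rw [List.takeWhile_cons, if_pos hc, ih (fun h => hx (List.mem_cons_of_mem _ h))]

lemma pv_takeWhile_nl_append {x : List Char} (r : List Char) (hx : '\n' ∉ x) :
    (x ++ '\n' :: r).takeWhile (fun c => c != '\n') = x := by
  induction x with
  | nil => simp [List.takeWhile_cons]
  | cons c t ih =>
    have hc : (c != '\n') = true := by
      rw [bne_iff_ne]
      intro h
      exact hx (h ▸ List.mem_cons_self ..)
    rw [List.cons_append, List.takeWhile_cons, if_pos hc,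
      ih (fun h => hx (List.mem_cons_of_mem _ h))]

lemma pv_find_lift (l r : List Char) (hm : ¬ pvMarkA <:+: l) {q : Nat}
    (hfr : PySem.Chars.find r pvMarkA = (q : Int)) :
    PySem.Chars.find (l ++ '\n' :: r) pvMarkA = ((l.length + 1 + q : Nat) : Int) := by
  have hq0 : 0 ≤ PySem.Chars.find r pvMarkA := by rw [hfr]; omega
  obtain ⟨har, hbr⟩ := PySem.Chars.find_spec hq0
  have hti : (PySem.Chars.find r pvMarkA).toNat = q := by omega
  rw [hti] at har hbr
  apply pv_find_eq (n := l.length + 1 + q)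
  · rw [pv_drop_shift]
    exact har
  · intro i hi hpre
    by_cases hil : i ≤ l.length
    · exact hm (pv_prefix_drop_infix (pv_occ_in_left pvMark_nl hil hpre).1)
    · rw [show i = l.length + 1 + (i - l.length - 1) by omega, pv_drop_shift] at hpre
      exact hbr (i - l.length - 1) (by omega) hpre

lemma pvD_second_nonl {cs : List Char} {i : Nat} (hf : PySem.Chars.find cs pvMarkA = (i : Int))
    (hnl : '\n' ∉ cs) (hD : ¬ D_extract_agreement_py (String.ofList cs)) :
    PySem.Chars.find (cs.drop (i + 16)) pvMarkA = -1 := by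
  simp only [D_extract_agreement_py, pv_toList_mk, pvMarkD_eq] at hD
  have hti : (PySem.Chars.find cs pvMarkA).toNat = i := by omega
  rw [hti, hf] at hD
  have hne : ((i : Int)) ≠ -1 := by omega
  have h2 : ¬ PySem.Chars.isIn pvMarkA ((cs.drop (i + 16)).takeWhile (fun c => c != '\n')) = true :=
    fun hb => hD ⟨hne, hb⟩
  rw [pv_takeWhile_no_nl (fun h => hnl (List.mem_of_mem_drop h))] at h2
  exact (PySem.Chars.find_eq_neg_one_iff _ _).mpr
    ((PySem.Chars.isIn_eq_false_iff _ _).mp (Bool.eq_false_iff.mpr h2))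

lemma pvD_second_line {l r : List Char} {p : Nat} (hl : '\n' ∉ l)
    (hfg : PySem.Chars.find (l ++ '\n' :: r) pvMarkA = (p : Int))
    (hplen : p + 16 ≤ l.length)
    (hD : ¬ D_extract_agreement_py (String.ofList (l ++ '\n' :: r))) :
    PySem.Chars.find (l.drop (p + 16)) pvMarkA = -1 := by
  simp only [D_extract_agreement_py, pv_toList_mk, pvMarkD_eq] at hD
  have hti : (PySem.Chars.find (l ++ '\n' :: r) pvMarkA).toNat = p := by omega
  rw [hti, hfg] at hD
  have hne : ((p : Int)) ≠ -1 := by omega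
  have h2 : ¬ PySem.Chars.isIn pvMarkA
      (((l ++ '\n' :: r).drop (p + 16)).takeWhile (fun c => c != '\n')) = true :=
    fun hb => hD ⟨hne, hb⟩
  have hdropcs : (l ++ '\n' :: r).drop (p + 16) = l.drop (p + 16) ++ '\n' :: r := by
    rw [List.drop_append_of_le_length (by omega)]
  rw [hdropcs, pv_takeWhile_nl_append r (fun h => hl (List.mem_of_mem_drop h))] at h2
  exact (PySem.Chars.find_eq_neg_one_iff _ _).mpr
    ((PySem.Chars.isIn_eq_false_iff _ _).mp (Bool.eq_false_iff.mpr h2))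

lemma pvD_skip {l r : List Char} (hl : '\n' ∉ l) (hm : ¬ pvMarkA <:+: l)
    (hD : ¬ D_extract_agreement_py (String.ofList (l ++ '\n' :: r))) :
    ¬ D_extract_agreement_py (String.ofList r) := by
  intro hDr
  apply hD
  simp only [D_extract_agreement_py, pv_toList_mk, pvMarkD_eq] at hDr ⊢
  obtain ⟨h1, h2⟩ := hDr
  have hq0 : 0 ≤ PySem.Chars.find r pvMarkA := by
    have := PySem.Chars.neg_one_le_find r pvMarkA
    omega
  set q := (PySem.Chars.find r pvMarkA).toNat with hq
  have hfr : PySem.Chars.find r pvMarkA = (q : Int) := by omega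
  have hcs := pv_find_lift l r hm hfr
  refine ⟨by rw [hcs]; omega, ?_⟩
  rw [show (PySem.Chars.find (l ++ '\n' :: r) pvMarkA).toNat = l.length + 1 + q by
    rw [hcs, Int.toNat_natCast]]
  rw [show l.length + 1 + q + 16 = l.length + 1 + (q + 16) by omega, pv_drop_shift]
  exact h2

-- ===== A = B case lemmas =====

lemma pvAB_line_nil (cs : List Char) (hnl : '\n' ∉ cs) (hm : pvMarkA <:+: cs)
    (hD : ¬ D_extract_agreement_py (String.ofList cs)) :
    String.ofList (PySem.Chars.strip (pvAfter cs)) = extract_agreement_py_alt (String.ofList cs) := by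
  have h0 : 0 ≤ PySem.Chars.find cs pvMarkA := (PySem.Chars.find_nonneg_iff _ _).mpr hm
  obtain ⟨ha, _⟩ := PySem.Chars.find_spec h0
  set p := (PySem.Chars.find cs pvMarkA).toNat with hp
  have hf : PySem.Chars.find cs pvMarkA = (p : Int) := by omega
  obtain ⟨w, hw⟩ := ha
  have hplen : p + 16 ≤ cs.length := by
    have := congrArg List.length hw
    simp [pvMark_len] at this
    omega
  have hsec := pvD_second_nonl hf hnl hD
  have hnlv : '\n' ∉ cs.drop (p + 16) := fun hmem => hnl (List.mem_of_mem_drop hmem)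
  have hjn : PySem.Chars.find (cs.drop (p + 16)) ['\n'] = -1 := by
    apply pv_find_neg
    intro i hpre
    obtain ⟨w2, hw2⟩ := hpre
    apply hnlv
    apply List.mem_of_mem_drop (l := cs.drop (p + 16)) (i := i)
    rw [← hw2]
    simp
  rw [pvB_eval_nonl hf hplen hjn]
  rw [pvAfter_nosecond (by rw [← hp]; exact hsec), ← hp]

lemma pvAB_line_cons (l r : List Char) (hl : '\n' ∉ l) (hm : pvMarkA <:+: l)
    (hD : ¬ D_extract_agreement_py (String.ofList (l ++ '\n' :: r))) :
    String.ofList (PySem.Chars.strip (pvAfter l)) = extract_agreement_py_alt (String.ofList (l ++ '\n' :: r)) := by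
  have h0 : 0 ≤ PySem.Chars.find l pvMarkA := (PySem.Chars.find_nonneg_iff _ _).mpr hm
  obtain ⟨hal, hbl⟩ := PySem.Chars.find_spec h0
  set p := (PySem.Chars.find l pvMarkA).toNat with hp
  obtain ⟨w, hw⟩ := hal
  have hplen : p + 16 ≤ l.length := by
    have := congrArg List.length hw
    simp [pvMark_len] at this
    omega
  have hfind : PySem.Chars.find (l ++ '\n' :: r) pvMarkA = (p : Int) := by
    apply pv_find_eq (n := p)
    · rw [List.drop_append_of_le_length (by omega)]
      exact List.prefix_append_of_prefix ⟨w, hw⟩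
    · intro i hi hpre
      exact hbl i hi (pv_occ_in_left pvMark_nl (by omega) hpre).1
  have hsec := pvD_second_line hl hfind hplen hD
  have hnlv : '\n' ∉ l.drop (p + 16) := fun hmem => hl (List.mem_of_mem_drop hmem)
  have hdropcs : (l ++ '\n' :: r).drop (p + 16) = l.drop (p + 16) ++ '\n' :: r := by
    rw [List.drop_append_of_le_length (by omega)]
  have hjn : PySem.Chars.find (l.drop (p + 16) ++ '\n' :: r) ['\n'] = (((l.drop (p + 16)).length : Nat) : Int) := by
    apply pv_find_eq (n := (l.drop (p + 16)).length)
    · rw [List.drop_left]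
      exact ⟨r, rfl⟩
    · intro i hi hpre
      obtain ⟨w2, hw2⟩ := hpre
      apply hnlv
      have hg : (l.drop (p + 16) ++ '\n' :: r)[i]? = some '\n' := by
        have hg0 : ((l.drop (p + 16) ++ '\n' :: r).drop i)[0]? = some '\n' := by
          rw [← hw2]; rfl
        rwa [List.getElem?_drop, Nat.add_zero] at hg0
      rw [List.getElem?_append_left hi] at hg
      exact List.mem_of_getElem? hg
  have hjn' : PySem.Chars.find ((l ++ '\n' :: r).drop (p + 16)) ['\n'] = (((l.drop (p + 16)).length : Nat) : Int) := by
    rw [hdropcs]; exact hjn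
  have hcslen : (l ++ '\n' :: r).length = l.length + 1 + r.length := by
    rw [List.length_append, List.length_cons]; omega
  rw [pvB_eval_nl hfind (by omega) hjn']
  rw [pvAfter_nosecond (by rw [← hp]; exact hsec), ← hp]
  refine congrArg (fun x => String.ofList (PySem.Chars.strip x)) ?_
  rw [hdropcs, List.take_left]

lemma pvB_skip (l r : List Char) (hl : '\n' ∉ l) (hm : ¬ pvMarkA <:+: l) :
    extract_agreement_py_alt (String.ofList (l ++ '\n' :: r)) = extract_agreement_py_alt (String.ofList r) := by
  have hcslen : (l ++ '\n' :: r).length = l.length + 1 + r.length := by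
    rw [List.length_append, List.length_cons]; omega
  by_cases hfr : PySem.Chars.find r pvMarkA = -1
  · have hcs : PySem.Chars.find (l ++ '\n' :: r) pvMarkA = -1 := by
      apply pv_find_neg
      intro i hpre
      by_cases hi : i ≤ l.length
      · exact hm (pv_prefix_drop_infix (pv_occ_in_left pvMark_nl hi hpre).1)
      · rw [show i = l.length + 1 + (i - l.length - 1) by omega, pv_drop_shift] at hpre
        exact pv_find_neg_all hfr _ hpre
    rw [pvB_unknown hcs, pvB_unknown hfr]
  · have hq0 : 0 ≤ PySem.Chars.find r pvMarkA := by
      have := PySem.Chars.neg_one_le_find r pvMarkA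
      omega
    set q := (PySem.Chars.find r pvMarkA).toNat with hq
    have hfr' : PySem.Chars.find r pvMarkA = (q : Int) := by omega
    obtain ⟨har, hbr⟩ := PySem.Chars.find_spec hq0
    obtain ⟨w, hw⟩ := har
    have hql : q + 16 ≤ r.length := by
      have := congrArg List.length hw
      simp [pvMark_len] at this
      omega
    have hcs := pv_find_lift l r hm hfr'
    have hdrop : (l ++ '\n' :: r).drop (l.length + 1 + q + 16) = r.drop (q + 16) := by
      rw [show l.length + 1 + q + 16 = l.length + 1 + (q + 16) by omega, pv_drop_shift]
    have hFn1 := PySem.Chars.neg_one_le_find (r.drop (q + 16)) ['\n']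
    by_cases hE : PySem.Chars.find (r.drop (q + 16)) ['\n'] = -1
    · have hE' : PySem.Chars.find ((l ++ '\n' :: r).drop (l.length + 1 + q + 16)) ['\n'] = -1 := by
        rw [hdrop]; exact hE
      rw [pvB_eval_nonl hcs (by omega) hE', pvB_eval_nonl hfr' (by omega) hE, hdrop]
    · set e := (PySem.Chars.find (r.drop (q + 16)) ['\n']).toNat with he
      have hE2 : PySem.Chars.find (r.drop (q + 16)) ['\n'] = (e : Int) := by omega
      have hE2' : PySem.Chars.find ((l ++ '\n' :: r).drop (l.length + 1 + q + 16)) ['\n'] = (e : Int) := by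
        rw [hdrop]; exact hE2
      rw [pvB_eval_nl hcs (by omega) hE2', pvB_eval_nl hfr' (by omega) hE2, hdrop]

-- ===== main induction =====

lemma pv_main : ∀ (n : Nat) (cs : List Char), cs.length < n →
    ¬ D_extract_agreement_py (String.ofList cs) →
    pvALoop (pvLines cs) = extract_agreement_py_alt (String.ofList cs) := by
  intro n
  induction n with
  | zero => intro cs h; omega
  | succ m ih =>
    intro cs hlen hD
    by_cases hnl : '\n' ∈ cs
    · have hdw : cs.dropWhile (fun c => c != '\n') ≠ [] := by
        intro hnil
        rw [List.dropWhile_eq_nil_iff] at hnil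
        have := hnil _ hnl
        simp at this
      obtain ⟨c0, r, hr⟩ : ∃ c0 r, cs.dropWhile (fun c => c != '\n') = c0 :: r := by
        cases h : cs.dropWhile (fun c => c != '\n') with
        | nil => exact absurd h hdw
        | cons a t => exact ⟨a, t, rfl⟩
      have hc0 : c0 = '\n' := by
        have hnp := List.head_dropWhile_not (fun c => c != '\n') hdw
        have h3 := List.head?_eq_head (l := cs.dropWhile (fun c => c != '\n')) hdw
        have h4 : (cs.dropWhile (fun c => c != '\n')).head? = some c0 := by rw [hr]; rfl
        rw [h3] at h4
        have h5 := Option.some.inj h4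
        rw [h5] at hnp
        simpa using hnp
      have hcs : cs = cs.takeWhile (fun c => c != '\n') ++ '\n' :: r := by
        conv_lhs => rw [← List.takeWhile_append_dropWhile (p := fun c => c != '\n') (l := cs)]
        rw [hr, hc0]
      have hlnl : '\n' ∉ cs.takeWhile (fun c => c != '\n') := by
        intro hmem
        have := List.mem_takeWhile_imp hmem
        simp at this
      by_cases hm : pvMarkA <:+: cs.takeWhile (fun c => c != '\n')
      · rw [hcs] at hD ⊢
        rw [pvLines_split r hlnl, pvALoop_cons_mark _ hm]
        exact pvAB_line_cons _ r hlnl hm hD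
      · rw [hcs] at hD ⊢
        rw [pvLines_split r hlnl, pvALoop_cons_nomark _ hm, pvB_skip _ r hlnl hm]
        apply ih
        · have hlen2 : cs.length = (cs.takeWhile (fun c => c != '\n')).length + 1 + r.length := by
            conv_lhs => rw [hcs]
            rw [List.length_append, List.length_cons]
            omega
          omega
        · exact pvD_skip hlnl hm hD
    · rw [pvLines_no_nl hnl]
      by_cases hm : pvMarkA <:+: cs
      · rw [pvALoop_cons_mark _ hm]
        exact pvAB_line_nil cs hnl hm hD
      · rw [pvALoop_cons_nomark _ hm]
        rw [pvB_unknown ((PySem.Chars.find_eq_neg_one_iff _ _).mpr hm)]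
        rfl

-- ===== tightness: A ≠ B everywhere inside D_ =====

lemma pv_dropWhile_nonspace_cons {c : Char} (h : PySem.Chars.isspace c = false) (t : List Char) :
    List.dropWhile PySem.Chars.isspace (c :: t) = c :: t := by
  simp [List.dropWhile_cons, h]

lemma pv_len_dropWhile_append (a b : List Char) :
    (List.dropWhile PySem.Chars.isspace b).length ≤ (List.dropWhile PySem.Chars.isspace (a ++ b)).length := by
  induction a with
  | nil => simp
  | cons x a ih =>
    rw [List.cons_append, List.dropWhile_cons]
    split
    · exact ih
    · have h1 := List.length_dropWhile_le PySem.Chars.isspace b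
      simp only [List.length_cons, List.length_append]
      omega

lemma pv_mark_head : pvMarkA = 'A' :: "greement Level:".toList := by decide

lemma pv_mark_rev : pvMarkA.reverse = ':' :: "leveL tnemeergA".toList := by decide

lemma pv_strip_len_lt (u z : List Char) :
    (PySem.Chars.strip u).length < (PySem.Chars.strip (u ++ pvMarkA ++ z)).length := by
  have hA : PySem.Chars.isspace 'A' = false := by decide
  have hC : PySem.Chars.isspace ':' = false := by decide
  unfold PySem.Chars.strip PySem.Chars.rstrip PySem.Chars.lstrip
  simp only [List.length_reverse]
  rw [List.append_assoc, List.dropWhile_append]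
  by_cases hu : List.dropWhile PySem.Chars.isspace u = []
  · rw [if_pos (by simp [hu])]
    have hmz : List.dropWhile PySem.Chars.isspace (pvMarkA ++ z) = pvMarkA ++ z := by
      rw [pv_mark_head, List.cons_append, pv_dropWhile_nonspace_cons hA, ← List.cons_append,
        ← pv_mark_head]
    rw [hmz, hu, List.reverse_append]
    have h1 := pv_len_dropWhile_append z.reverse pvMarkA.reverse
    have hm16 : (List.dropWhile PySem.Chars.isspace pvMarkA.reverse).length = 16 := by decide
    simp only [List.reverse_nil, List.dropWhile_nil, List.length_nil]
    omega
  · rw [if_neg (by simpa using hu)]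
    set w := List.dropWhile PySem.Chars.isspace u with hw
    have h2 : (w ++ (pvMarkA ++ z)).reverse = z.reverse ++ (pvMarkA.reverse ++ w.reverse) := by
      simp [List.reverse_append]
    rw [h2]
    have h1 := pv_len_dropWhile_append z.reverse (pvMarkA.reverse ++ w.reverse)
    have hd : List.dropWhile PySem.Chars.isspace (pvMarkA.reverse ++ w.reverse)
        = pvMarkA.reverse ++ w.reverse := by
      rw [pv_mark_rev, List.cons_append, pv_dropWhile_nonspace_cons hC, ← List.cons_append,
        ← pv_mark_rev]
    rw [hd] at h1
    have h3 : (pvMarkA.reverse ++ w.reverse).length = 16 + w.length := by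
      simp [pvMark_len]
    have h4 := List.length_dropWhile_le PySem.Chars.isspace w.reverse
    simp only [List.length_reverse] at h4
    omega

lemma pv_strip_ne {u z : List Char} {seg : List Char} (hseg : seg = u ++ pvMarkA ++ z) :
    String.ofList (PySem.Chars.strip u) ≠ String.ofList (PySem.Chars.strip seg) := by
  intro h
  have h2 := congrArg String.toList h
  rw [pv_toList_mk, pv_toList_mk] at h2
  have h3 := congrArg List.length h2
  have := pv_strip_len_lt u z
  rw [hseg] at h3
  omega

lemma pvAfter_second {line : List Char} {t : Nat}
    (hv : PySem.Chars.find (line.drop ((PySem.Chars.find line pvMarkA).toNat + 16)) pvMarkA = (t : Int)) :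
    pvAfter line = (line.drop ((PySem.Chars.find line pvMarkA).toNat + 16)).take t := by
  unfold pvAfter
  rw [hv, if_neg (by omega), Int.toNat_natCast]

-- D_ forward: the marker occurs again in the rest of the agreement line
lemma pvD_isIn_nonl {cs : List Char} {i : Nat} (hf : PySem.Chars.find cs pvMarkA = (i : Int))
    (hnl : '\n' ∉ cs) (hD : D_extract_agreement_py (String.ofList cs)) :
    pvMarkA <:+: cs.drop (i + 16) := by
  simp only [D_extract_agreement_py, pv_toList_mk, pvMarkD_eq] at hD
  have hti : (PySem.Chars.find cs pvMarkA).toNat = i := by omega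
  rw [hti] at hD
  obtain ⟨_, h2⟩ := hD
  rw [pv_takeWhile_no_nl (fun h => hnl (List.mem_of_mem_drop h))] at h2
  exact (PySem.Chars.isIn_iff_infix _ _).mp h2

lemma pvD_isIn_line {l r : List Char} {p : Nat} (hl : '\n' ∉ l)
    (hfg : PySem.Chars.find (l ++ '\n' :: r) pvMarkA = (p : Int))
    (hplen : p + 16 ≤ l.length)
    (hD : D_extract_agreement_py (String.ofList (l ++ '\n' :: r))) :
    pvMarkA <:+: l.drop (p + 16) := by
  simp only [D_extract_agreement_py, pv_toList_mk, pvMarkD_eq] at hD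
  have hti : (PySem.Chars.find (l ++ '\n' :: r) pvMarkA).toNat = p := by omega
  rw [hti] at hD
  obtain ⟨_, h2⟩ := hD
  have hdropcs : (l ++ '\n' :: r).drop (p + 16) = l.drop (p + 16) ++ '\n' :: r := by
    rw [List.drop_append_of_le_length (by omega)]
  rw [hdropcs, pv_takeWhile_nl_append r (fun h => hl (List.mem_of_mem_drop h))] at h2
  exact (PySem.Chars.isIn_iff_infix _ _).mp h2

lemma pvD_unskip {l r : List Char} (hl : '\n' ∉ l) (hm : ¬ pvMarkA <:+: l)
    (hD : D_extract_agreement_py (String.ofList (l ++ '\n' :: r))) :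
    D_extract_agreement_py (String.ofList r) := by
  simp only [D_extract_agreement_py, pv_toList_mk, pvMarkD_eq] at hD ⊢
  obtain ⟨h1, h2⟩ := hD
  have hin : pvMarkA <:+: (l ++ '\n' :: r) := (PySem.Chars.find_ne_neg_one_iff _ _).mp h1
  have h0 : 0 ≤ PySem.Chars.find (l ++ '\n' :: r) pvMarkA :=
    (PySem.Chars.find_nonneg_iff _ _).mpr hin
  obtain ⟨ha, hb⟩ := PySem.Chars.find_spec h0
  set t := (PySem.Chars.find (l ++ '\n' :: r) pvMarkA).toNat with ht
  have htg : l.length + 1 ≤ t := by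
    by_contra hlt
    push_neg at hlt
    exact hm (pv_prefix_drop_infix (pv_occ_in_left pvMark_nl (by omega) ha).1)
  have hfr : PySem.Chars.find r pvMarkA = ((t - l.length - 1 : Nat) : Int) := by
    apply pv_find_eq (n := t - l.length - 1)
    · have : (l ++ '\n' :: r).drop t = r.drop (t - l.length - 1) := by
        conv_lhs => rw [show t = l.length + 1 + (t - l.length - 1) by omega, pv_drop_shift]
      rw [← this]
      exact ha
    · intro k hk hpk
      have := hb (l.length + 1 + k) (by omega)
      rw [pv_drop_shift] at this
      exact this hpk
  refine ⟨by rw [hfr]; omega, ?_⟩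
  rw [show (PySem.Chars.find r pvMarkA).toNat = t - l.length - 1 by rw [hfr, Int.toNat_natCast]]
  have hshift : (l ++ '\n' :: r).drop (t + 16) = r.drop (t - l.length - 1 + 16) := by
    rw [show t + 16 = l.length + 1 + (t - l.length - 1 + 16) by omega, pv_drop_shift]
  rw [← hshift]
  exact h2

lemma pv_main_diff : ∀ (n : Nat) (cs : List Char), cs.length < n →
    D_extract_agreement_py (String.ofList cs) →
    pvALoop (pvLines cs) ≠ extract_agreement_py_alt (String.ofList cs) := by
  intro n
  induction n with
  | zero => intro cs h; omega
  | succ m ih =>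
    intro cs hlen hD
    have hmark : pvMarkA <:+: cs := by
      have h1 : PySem.Chars.find cs pvMarkD ≠ -1 := by
        have := hD
        simp only [D_extract_agreement_py, pv_toList_mk] at this
        exact this.1
      rw [pvMarkD_eq] at h1
      exact (PySem.Chars.find_ne_neg_one_iff _ _).mp h1
    by_cases hnl : '\n' ∈ cs
    · have hdw : cs.dropWhile (fun c => c != '\n') ≠ [] := by
        intro hnil
        rw [List.dropWhile_eq_nil_iff] at hnil
        have := hnil _ hnl
        simp at this
      obtain ⟨c0, r, hr⟩ : ∃ c0 r, cs.dropWhile (fun c => c != '\n') = c0 :: r := by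
        cases h : cs.dropWhile (fun c => c != '\n') with
        | nil => exact absurd h hdw
        | cons a t => exact ⟨a, t, rfl⟩
      have hc0 : c0 = '\n' := by
        have hnp := List.head_dropWhile_not (fun c => c != '\n') hdw
        have h3 := List.head?_eq_head (l := cs.dropWhile (fun c => c != '\n')) hdw
        have h4 : (cs.dropWhile (fun c => c != '\n')).head? = some c0 := by rw [hr]; rfl
        rw [h3] at h4
        have h5 := Option.some.inj h4
        rw [h5] at hnp
        simpa using hnp
      have hcs : cs = cs.takeWhile (fun c => c != '\n') ++ '\n' :: r := by
        conv_lhs => rw [← List.takeWhile_append_dropWhile (p := fun c => c != '\n') (l := cs)]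
        rw [hr, hc0]
      have hlnl : '\n' ∉ cs.takeWhile (fun c => c != '\n') := by
        intro hmem
        have := List.mem_takeWhile_imp hmem
        simp at this
      by_cases hm : pvMarkA <:+: cs.takeWhile (fun c => c != '\n')
      · rw [hcs] at hD ⊢
        set l := cs.takeWhile (fun c => c != '\n') with hldef
        rw [pvLines_split r hlnl, pvALoop_cons_mark _ hm]
        have h0 : 0 ≤ PySem.Chars.find l pvMarkA := (PySem.Chars.find_nonneg_iff _ _).mpr hm
        obtain ⟨hal, hbl⟩ := PySem.Chars.find_spec h0
        set p := (PySem.Chars.find l pvMarkA).toNat with hp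
        obtain ⟨w, hw⟩ := hal
        have hplen : p + 16 ≤ l.length := by
          have := congrArg List.length hw
          simp [pvMark_len] at this
          omega
        have hfind : PySem.Chars.find (l ++ '\n' :: r) pvMarkA = (p : Int) := by
          apply pv_find_eq (n := p)
          · rw [List.drop_append_of_le_length (by omega)]
            exact List.prefix_append_of_prefix ⟨w, hw⟩
          · intro i hi hpre
            exact hbl i hi (pv_occ_in_left pvMark_nl (by omega) hpre).1
        have hsec := pvD_isIn_line hlnl hfind hplen hD
        have ht0 : 0 ≤ PySem.Chars.find (l.drop (p + 16)) pvMarkA :=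
          (PySem.Chars.find_nonneg_iff _ _).mpr hsec
        set t := (PySem.Chars.find (l.drop (p + 16)) pvMarkA).toNat with htdef
        have htv : PySem.Chars.find (l.drop (p + 16)) pvMarkA = (t : Int) := by omega
        obtain ⟨hat, _⟩ := PySem.Chars.find_spec ht0
        rw [← htdef] at hat
        obtain ⟨z, hz⟩ := hat
        have hsegdec : l.drop (p + 16) = (l.drop (p + 16)).take t ++ pvMarkA ++ z := by
          conv_lhs => rw [← List.take_append_drop t (l.drop (p + 16)), ← hz]
          rw [List.append_assoc]
        have hnlv : '\n' ∉ l.drop (p + 16) := fun hmem => hlnl (List.mem_of_mem_drop hmem)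
        have hdropcs : (l ++ '\n' :: r).drop (p + 16) = l.drop (p + 16) ++ '\n' :: r := by
          rw [List.drop_append_of_le_length (by omega)]
        have hjn : PySem.Chars.find (l.drop (p + 16) ++ '\n' :: r) ['\n'] = (((l.drop (p + 16)).length : Nat) : Int) := by
          apply pv_find_eq (n := (l.drop (p + 16)).length)
          · rw [List.drop_left]
            exact ⟨r, rfl⟩
          · intro i hi hpre
            obtain ⟨w2, hw2⟩ := hpre
            apply hnlv
            have hg : (l.drop (p + 16) ++ '\n' :: r)[i]? = some '\n' := by
              have hg0 : ((l.drop (p + 16) ++ '\n' :: r).drop i)[0]? = some '\n' := by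
                rw [← hw2]; rfl
              rwa [List.getElem?_drop, Nat.add_zero] at hg0
            rw [List.getElem?_append_left hi] at hg
            exact List.mem_of_getElem? hg
        have hjn' : PySem.Chars.find ((l ++ '\n' :: r).drop (p + 16)) ['\n'] = (((l.drop (p + 16)).length : Nat) : Int) := by
          rw [hdropcs]; exact hjn
        have hcslen : (l ++ '\n' :: r).length = l.length + 1 + r.length := by
          rw [List.length_append, List.length_cons]; omega
        rw [pvB_eval_nl hfind (by omega) hjn']
        rw [pvAfter_second (by rw [← hp]; exact htv), ← hp]
        rw [show ((l ++ '\n' :: r).drop (p + 16)).take (l.drop (p + 16)).length = l.drop (p + 16) by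
          rw [hdropcs, List.take_left]]
        exact pv_strip_ne hsegdec
      · rw [hcs] at hD ⊢
        rw [pvLines_split r hlnl, pvALoop_cons_nomark _ hm, pvB_skip _ r hlnl hm]
        apply ih
        · have hlen2 : cs.length = (cs.takeWhile (fun c => c != '\n')).length + 1 + r.length := by
            conv_lhs => rw [hcs]
            rw [List.length_append, List.length_cons]
            omega
          omega
        · exact pvD_unskip hlnl hm hD
    · rw [pvLines_no_nl hnl, pvALoop_cons_mark _ hmark]
      have h0 : 0 ≤ PySem.Chars.find cs pvMarkA := (PySem.Chars.find_nonneg_iff _ _).mpr hmark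
      obtain ⟨ha, _⟩ := PySem.Chars.find_spec h0
      set p := (PySem.Chars.find cs pvMarkA).toNat with hp
      obtain ⟨w, hw⟩ := ha
      have hplen : p + 16 ≤ cs.length := by
        have := congrArg List.length hw
        simp [pvMark_len] at this
        omega
      have hf : PySem.Chars.find cs pvMarkA = (p : Int) := by omega
      have hsec := pvD_isIn_nonl hf hnl hD
      have ht0 : 0 ≤ PySem.Chars.find (cs.drop (p + 16)) pvMarkA :=
        (PySem.Chars.find_nonneg_iff _ _).mpr hsec
      set t := (PySem.Chars.find (cs.drop (p + 16)) pvMarkA).toNat with htdef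
      have htv : PySem.Chars.find (cs.drop (p + 16)) pvMarkA = (t : Int) := by omega
      obtain ⟨hat, _⟩ := PySem.Chars.find_spec ht0
      rw [← htdef] at hat
      obtain ⟨z, hz⟩ := hat
      have hsegdec : cs.drop (p + 16) = (cs.drop (p + 16)).take t ++ pvMarkA ++ z := by
        conv_lhs => rw [← List.take_append_drop t (cs.drop (p + 16)), ← hz]
        rw [List.append_assoc]
      have hnlv : '\n' ∉ cs.drop (p + 16) := fun hmem => hnl (List.mem_of_mem_drop hmem)
      have hjn : PySem.Chars.find (cs.drop (p + 16)) ['\n'] = -1 := by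
        apply pv_find_neg
        intro i hpre
        obtain ⟨w2, hw2⟩ := hpre
        apply hnlv
        apply List.mem_of_mem_drop (l := cs.drop (p + 16)) (i := i)
        rw [← hw2]
        simp
      rw [pvB_eval_nonl hf hplen hjn]
      rw [pvAfter_second (by rw [← hp]; exact htv), ← hp]
      exact pv_strip_ne hsegdec

-- ===== VERDICT (by name: the statements are the Claim_ definitions above) =====
theorem extract_agreement_py_spec : Claim_unchanged_extract_agreement_py := by
  intro content _
  unfold Spec_extract_agreement_py extract_agreement_py
  intro hD
  have hD' : ¬ D_extract_agreement_py (String.ofList content.toList) := by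
    rw [show String.ofList content.toList = content by simp]
    exact hD
  rw [pv_splitOn_nl, pv_main (content.toList.length + 1) content.toList (by omega) hD']
  rw [show String.ofList content.toList = content by simp]

theorem extract_agreement_py_changed : Claim_changed_extract_agreement_py := by
  unfold Claim_changed_extract_agreement_py; decide

theorem extract_agreement_py_tight : Claim_exact_extract_agreement_py := by
  intro content _ hD
  unfold extract_agreement_py
  have hD' : D_extract_agreement_py (String.ofList content.toList) := by
    rw [show String.ofList content.toList = content by simp]
    exact hD
  rw [pv_splitOn_nl]
  have h := pv_main_diff (content.toList.length + 1) content.toList (by omega) hD'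
  rw [show String.ofList content.toList = content by simp] at h
  exact h
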